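-- pv_equiv track=rewrite | github.com/liuandrew/bart_ppo | write_and_test/bart_compress_visualize_decode.py | split_by_ep
-- ===== SOURCE A (Python) =====
-- def split_by_ep(res, data):
--     '''After combining steps, return back to episode based split'''
--     ep_lens = [len(o) for o in res['obs']]
--
--     ep_data = []
--     cur_step = 0
--     for ep_len in ep_lens:
--         ep_data.append(data[cur_step:cur_step+ep_len])
--         cur_step += ep_len
--     return ep_data
-- ===== SOURCE B (Python) =====
-- def split_by_ep(res, data):
--     '''After combining steps, return back to episode based split'''
--     def go(obs, rest):
--         if not obs:
--             return []
--         k = len(obs[0])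
--         return [rest[:k]] + go(obs[1:], rest[k:])
--     return go(res['obs'], data)
-- ===== Notes on version B (the rewrite author's own statement) =====
-- stated objective: alternative
-- what changed: Replaces the iterative loop that indexes the original list with a running offset by a recursion over the episode list that structurally consumes the remaining data (take the head episode's prefix, recurse on the suffix), needing no offset arithmetic.
import Mathlib
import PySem

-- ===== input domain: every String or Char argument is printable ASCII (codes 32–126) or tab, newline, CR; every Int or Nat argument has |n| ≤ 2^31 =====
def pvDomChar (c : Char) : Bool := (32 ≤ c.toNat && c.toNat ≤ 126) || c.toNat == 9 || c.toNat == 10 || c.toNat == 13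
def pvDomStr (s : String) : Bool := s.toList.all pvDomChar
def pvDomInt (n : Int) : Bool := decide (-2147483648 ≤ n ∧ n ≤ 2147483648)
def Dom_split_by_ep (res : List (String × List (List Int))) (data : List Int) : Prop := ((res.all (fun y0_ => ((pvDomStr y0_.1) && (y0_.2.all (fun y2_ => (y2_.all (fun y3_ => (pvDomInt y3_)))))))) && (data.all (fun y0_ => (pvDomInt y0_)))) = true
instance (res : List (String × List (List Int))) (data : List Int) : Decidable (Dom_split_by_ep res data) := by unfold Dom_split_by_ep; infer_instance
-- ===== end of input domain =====

-- B replaces A's running-offset loop over the original list with a recursion that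
-- structurally consumes the remaining data (alternative decomposition, same cost).


-- ===== PORT A =====
-- res['obs'] (assoc-list first match; Pre_ guarantees the key is present, so getD's
-- default is never used); then the loop threading (ep_data, cur_step).
def split_by_ep (res : List (String × List (List Int))) (data : List Int) : List (List Int) :=
  let obs := (res.lookup "obs").getD []
  let ep_lens := obs.map (fun o => (o.length : Int))
  (ep_lens.foldl
    (fun (st : List (List Int) × Int) ep_len =>
      (st.1 ++ [PySem.List.slice data (some st.2) (some (st.2 + ep_len))], st.2 + ep_len))
    ([], 0)).1

-- ===== PORT B =====
-- go(obs, rest): [] if obs empty, else [rest[:k]] + go(obs[1:], rest[k:]) with k = len(obs[0]).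
def pvGo (obs : List (List Int)) (rest : List Int) : List (List Int) :=
  match obs with
  | [] => []
  | o :: obs' =>
      [PySem.List.slice rest none (some (o.length : Int))] ++
        pvGo obs' (PySem.List.slice rest (some (o.length : Int)) none)

def split_by_ep_alt (res : List (String × List (List Int))) (data : List Int) : List (List Int) :=
  pvGo ((res.lookup "obs").getD []) data

-- ===== PRECONDITION & SPEC =====
-- Pre_ excludes exactly the inputs where res has no 'obs' key, on which A (and B) raise KeyError.
def Pre_split_by_ep (res : List (String × List (List Int))) (_data : List Int) : Prop :=
  (res.lookup "obs").isSome = true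
instance (res : List (String × List (List Int))) (data : List Int) : Decidable (Pre_split_by_ep res data) := by unfold Pre_split_by_ep; infer_instance

def pvWitness_split_by_ep : (List (String × List (List Int))) × List Int :=
  ([("obs", [[1, 2], [3]])], [10, 20, 30])

def Spec_split_by_ep (res : List (String × List (List Int))) (data : List Int) (out : List (List Int)) : Prop := out = split_by_ep_alt res data
instance (res : List (String × List (List Int))) (data : List Int) (out : List (List Int)) : Decidable (Spec_split_by_ep res data out) := by unfold Spec_split_by_ep; infer_instance

-- ===== CLAIM (what is proved, stated in full; the proofs are below) =====
def Claim_equal_split_by_ep : Prop := ∀ (res : List (String × List (List Int))) (data : List Int), Dom_split_by_ep res data → Pre_split_by_ep res data → Spec_split_by_ep res data (split_by_ep res data)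

-- ===== LEMMAS AND PROOFS =====

-- Common specification: the chunks of `data`, one per element of `obs`, from offset `cur`.
def pvChunks (data : List Int) : List (List Int) → Int → List (List Int)
  | [], _ => []
  | o :: obs, cur =>
      PySem.List.slice data (some cur) (some (cur + (o.length : Int))) ::
        pvChunks data obs (cur + (o.length : Int))

-- A's fold equals acc ++ chunks.
theorem pvA_fold (data : List Int) (obs : List (List Int))
    (acc : List (List Int)) (cur : Int) :
    ((obs.map (fun o => (o.length : Int))).foldl
      (fun (st : List (List Int) × Int) ep_len =>
        (st.1 ++ [PySem.List.slice data (some st.2) (some (st.2 + ep_len))], st.2 + ep_len))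
      (acc, cur)).1 = acc ++ pvChunks data obs cur := by
  induction obs generalizing acc cur with
  | nil => simp [pvChunks]
  | cons o obs ih => simp [pvChunks, ih]

-- B's recursion on the dropped suffix equals the chunks at the corresponding offset.
theorem pvB_go (data : List Int) (obs : List (List Int)) (cur : Nat) :
    pvGo obs (data.drop cur) = pvChunks data obs (cur : Int) := by
  induction obs generalizing cur with
  | nil => simp [pvGo, pvChunks]
  | cons o obs ih =>
      have h1 : PySem.List.slice (data.drop cur) none (some (o.length : Int))
          = (data.drop cur).take o.length := PySem.List.slice_to_natCast _ _
      have h2 : PySem.List.slice (data.drop cur) (some (o.length : Int)) none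
          = (data.drop cur).drop o.length := PySem.List.slice_from_natCast _ _
      have h3 : PySem.List.slice data (some (cur : Int)) (some ((cur : Int) + (o.length : Int)))
          = (data.drop cur).take o.length := PySem.List.slice_natCast_add _ _ _
      simp only [pvGo, pvChunks, h1, h2, h3, List.drop_drop]
      have := ih (cur + o.length)
      simp only [Nat.cast_add] at this
      rw [this]; rfl

-- ===== VERDICT (by name: the statement is the Claim_ definition above) =====
theorem split_by_ep_spec : Claim_equal_split_by_ep := by
  intro res data _ _
  show split_by_ep res data = split_by_ep_alt res data
  unfold split_by_ep split_by_ep_alt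
  rw [pvA_fold]
  have := pvB_go data ((res.lookup "obs").getD []) 0
  simpa using this.symm
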